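-- pv_equiv track=rewrite | github.com/Arin0421/Algorithm | programmers/lv1/약수의 개수와 덧셈.py | solution
-- ===== SOURCE A (Python) =====
-- def solution(left, right):
--     answer = 0
--     for i in range(left,right+1):
--         num=0
--         for j in range(1,i+1):
--             if i%j==0:
--                 num+=1
--
--         if num%2==0:
--             answer+=i
--         elif num%2!=0:
--             answer-=i
--
--     return answer
-- ===== SOURCE B (Python) =====
-- def _isqrt(n):
--     # largest s >= 0 with s*s <= n (for n >= 0), by binary search
--     lo, hi = 0, n + 1
--     while hi - lo > 1:
--         mid = lo + (hi - lo) // 2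
--         if mid * mid <= n:
--             lo = mid
--         else:
--             hi = mid
--     return lo
--
--
-- def _is_square(i):
--     # i has an odd number of divisors in [1, i] iff i is a positive perfect square
--     if i < 1:
--         return False
--     s = _isqrt(i)
--     return s * s == i
--
--
-- def solution(left, right):
--     answer = 0
--     for i in range(left, right + 1):
--         if _is_square(i):
--             answer -= i
--         else:
--             answer += i
--     return answer
-- ===== Notes on version B (the rewrite author's own statement) =====
-- stated objective: alternative
-- what changed: B replaces A's inner divisor-counting loop by an integer-square-root (binary search) test per number, using the fact that the divisor count of i is odd iff i is a positive perfect square.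
import Mathlib
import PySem

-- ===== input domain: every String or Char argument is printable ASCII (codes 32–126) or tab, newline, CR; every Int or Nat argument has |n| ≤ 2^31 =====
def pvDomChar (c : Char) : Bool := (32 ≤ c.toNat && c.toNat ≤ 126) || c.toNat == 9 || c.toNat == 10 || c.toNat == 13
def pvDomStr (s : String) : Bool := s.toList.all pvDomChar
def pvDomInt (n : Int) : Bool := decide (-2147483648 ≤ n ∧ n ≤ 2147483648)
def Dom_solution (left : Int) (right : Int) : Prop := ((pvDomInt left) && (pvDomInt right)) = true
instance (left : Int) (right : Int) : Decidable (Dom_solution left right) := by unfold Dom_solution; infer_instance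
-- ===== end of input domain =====

-- B replaces A's inner divisor-counting loop by an integer-square-root (binary search)
-- test per number: the divisor count of i is odd iff i is a positive perfect square.

-- ===== PORT A =====
def solution (left : Int) (right : Int) : Int :=
  (PySem.List.pyRange left (right + 1) 1).foldl (fun answer i =>
    let num := (PySem.List.pyRange 1 (i + 1) 1).foldl
      (fun num j => if PySem.Int.mod i j == 0 then num + 1 else num) (0 : Int)
    if PySem.Int.mod num 2 == 0 then answer + i else answer - i) 0

-- ===== PORT B =====
-- _isqrt's while loop; terminates since hi - lo strictly shrinks
def isqrtLoop (n lo hi : Int) : Int :=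
  if _h : hi - lo > 1 then
    let mid := lo + PySem.Int.floordiv (hi - lo) 2
    if mid * mid ≤ n then isqrtLoop n mid hi else isqrtLoop n lo mid
  else lo
termination_by (hi - lo).toNat
decreasing_by
  all_goals
    have h2 : PySem.Int.floordiv (hi - lo) 2 = (hi - lo) / 2 :=
      PySem.Int.floordiv_eq_ediv_of_pos (by omega)
    simp only [mid, h2]
    omega

def isqrtB (n : Int) : Int := isqrtLoop n 0 (n + 1)

def isSquareB (i : Int) : Bool :=
  if i < 1 then false
  else
    let s := isqrtB i
    s * s == i

def solution_alt (left : Int) (right : Int) : Int :=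
  (PySem.List.pyRange left (right + 1) 1).foldl
    (fun answer i => if isSquareB i then answer - i else answer + i) 0

-- ===== PRECONDITION & SPEC =====
def Spec_solution (left : Int) (right : Int) (out : Int) : Prop := out = solution_alt left right
instance (left : Int) (right : Int) (out : Int) : Decidable (Spec_solution left right out) := by unfold Spec_solution; infer_instance

-- ===== CLAIM (what is proved, stated in full; the proofs are below) =====
def Claim_equal_solution : Prop := ∀ (left : Int) (right : Int), Dom_solution left right → Spec_solution left right (solution left right)

-- ===== LEMMAS AND PROOFS =====

-- counting fold = countP
theorem foldl_count (p : Int → Bool) (l : List Int) (init : Int) :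
    l.foldl (fun n j => if p j then n + 1 else n) init = init + (l.countP p : Int) := by
  induction l generalizing init with
  | nil => simp
  | cons a t ih =>
    by_cases h : p a = true <;> simp [List.countP_cons, h, ih] <;> push_cast <;> ring

-- the binary search returns the integer square root
theorem isqrtLoop_spec (n lo hi : Int) (h0 : 0 ≤ lo) (hlo : lo * lo ≤ n)
    (hhi : n < hi * hi) (hlt : lo < hi) :
    0 ≤ isqrtLoop n lo hi ∧ isqrtLoop n lo hi * isqrtLoop n lo hi ≤ n ∧
      n < (isqrtLoop n lo hi + 1) * (isqrtLoop n lo hi + 1) := by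
  fun_induction isqrtLoop n lo hi with
  | case1 lo hi h mid htest ih =>
    have h2 : PySem.Int.floordiv (hi - lo) 2 = (hi - lo) / 2 :=
      PySem.Int.floordiv_eq_ediv_of_pos (by omega)
    have hm : mid = lo + (hi - lo) / 2 := by simp only [mid, h2]
    exact ih (by omega) htest hhi (by omega)
  | case2 lo hi h mid htest ih =>
    have h2 : PySem.Int.floordiv (hi - lo) 2 = (hi - lo) / 2 :=
      PySem.Int.floordiv_eq_ediv_of_pos (by omega)
    have hm : mid = lo + (hi - lo) / 2 := by simp only [mid, h2]
    exact ih h0 hlo (by omega) (by omega)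
  | case3 lo hi h =>
    have : hi = lo + 1 := by omega
    exact ⟨h0, hlo, by rw [← this]; exact hhi⟩

-- isSquareB decides "positive perfect square"
theorem isSquareB_iff (n : ℕ) (hn : 1 ≤ n) : isSquareB (n : Int) = true ↔ IsSquare n := by
  have hpos : ¬ ((n : Int) < 1) := by exact_mod_cast not_lt.2 (by exact_mod_cast hn)
  have hspec := isqrtLoop_spec (n : Int) 0 ((n : Int) + 1) le_rfl
    (by positivity) (by nlinarith [Int.natCast_nonneg n]) (by positivity)
  obtain ⟨hs0, hs1, hs2⟩ := hspec
  simp only [isSquareB, isqrtB, hpos, if_false, beq_iff_eq]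
  constructor
  · intro h
    refine ⟨(isqrtLoop (n : Int) 0 ((n : Int) + 1)).toNat, ?_⟩
    have hh : (((isqrtLoop (n : Int) 0 ((n : Int) + 1)).toNat : Int)) *
        (((isqrtLoop (n : Int) 0 ((n : Int) + 1)).toNat : Int)) = (n : Int) := by
      rw [Int.toNat_of_nonneg hs0]; exact h
    exact_mod_cast hh.symm
  · rintro ⟨k, hk⟩
    set s := isqrtLoop (n : Int) 0 ((n : Int) + 1) with hsdef
    have hk' : (k : Int) * (k : Int) = (n : Int) := by exact_mod_cast hk.symm
    have h1 : s ≤ (k : Int) := by nlinarith [Int.natCast_nonneg k]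
    have h2 : (k : Int) ≤ s := by nlinarith [Int.natCast_nonneg k]
    have : s = (k : Int) := le_antisymm h1 h2
    rw [this, hk']

-- countP over List.range = card of the filtered Finset.range
theorem countP_range_card (p : ℕ → Bool) (n : ℕ) :
    (List.range n).countP p = ((Finset.range n).filter (fun k => p k = true)).card := by
  induction n with
  | zero => simp
  | succ m ih =>
    rw [List.range_succ, List.countP_append, Finset.range_add_one, Finset.filter_insert]
    by_cases h : p m = true
    · rw [if_pos h, Finset.card_insert_of_notMem (by simp)]
      simp [h, ih]
    · rw [if_neg h]
      simp [h, ih]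

-- list count of divisors = card of the divisors finset
theorem countP_divisors (n : ℕ) (hn : n ≠ 0) :
    (List.range n).countP (fun k => decide ((1 + k) ∣ n)) = n.divisors.card := by
  classical
  rw [countP_range_card]
  rw [show ((Finset.range n).filter (fun k => (decide ((1 + k) ∣ n)) = true)) =
      ((Finset.range n).filter (fun k => (1 + k) ∣ n)) from
    Finset.filter_congr (fun k _ => by simp)]
  refine Finset.card_bij' (fun k _ => 1 + k) (fun d _ => d - 1) ?_ ?_ ?_ ?_
  · intro k hk
    obtain ⟨-, hdvd⟩ := Finset.mem_filter.1 hk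
    show 1 + k ∈ n.divisors
    exact Nat.mem_divisors.2 ⟨hdvd, hn⟩
  · intro d hd
    obtain ⟨hdvd, -⟩ := Nat.mem_divisors.1 hd
    have hd1 : 1 ≤ d := Nat.one_le_iff_ne_zero.2 (by rintro rfl; exact hn (Nat.zero_dvd.1 hdvd))
    have hdn : d ≤ n := Nat.le_of_dvd (Nat.pos_of_ne_zero hn) hdvd
    show d - 1 ∈ (Finset.range n).filter (fun k => (1 + k) ∣ n)
    refine Finset.mem_filter.2 ⟨Finset.mem_range.2 (by omega), ?_⟩
    rwa [show 1 + (d - 1) = d by omega]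
  · intro k _
    show (1 + k) - 1 = k
    omega
  · intro d hd
    obtain ⟨hdvd, -⟩ := Nat.mem_divisors.1 hd
    have hd1 : 1 ≤ d := Nat.one_le_iff_ne_zero.2 (by rintro rfl; exact hn (Nat.zero_dvd.1 hdvd))
    show 1 + (d - 1) = d
    omega

-- the pairing d ↦ n / d : divisors with d*d < n  ↔  divisors with n < d*d
theorem card_small_eq_card_big (n : ℕ) (hn : n ≠ 0) :
    (n.divisors.filter (fun d => d * d < n)).card =
      (n.divisors.filter (fun d => n < d * d)).card := by
  classical
  refine Finset.card_bij' (fun d _ => n / d) (fun d _ => n / d) ?_ ?_ ?_ ?_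
  all_goals
    intro d hd
    obtain ⟨hmem, hside⟩ := Finset.mem_filter.1 hd
    obtain ⟨hdvd, -⟩ := Nat.mem_divisors.1 hmem
    have hdpos : 0 < d := Nat.pos_of_ne_zero (by rintro rfl; exact hn (Nat.zero_dvd.1 hdvd))
    have hmul : d * (n / d) = n := Nat.mul_div_cancel' hdvd
    have hepos : 0 < n / d := Nat.div_pos (Nat.le_of_dvd (Nat.pos_of_ne_zero hn) hdvd) hdpos
    have hediv : (n / d) ∣ n := ⟨d, (Nat.div_mul_cancel hdvd).symm⟩
  · -- small → big
    show n / d ∈ n.divisors.filter (fun d => n < d * d)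
    refine Finset.mem_filter.2 ⟨Nat.mem_divisors.2 ⟨hediv, hn⟩, ?_⟩
    nlinarith
  · -- big → small
    show n / d ∈ n.divisors.filter (fun d => d * d < n)
    refine Finset.mem_filter.2 ⟨Nat.mem_divisors.2 ⟨hediv, hn⟩, ?_⟩
    nlinarith
  · show n / (n / d) = d
    exact Nat.div_div_self hdvd hn
  · show n / (n / d) = d
    exact Nat.div_div_self hdvd hn

theorem odd_card_divisors_iff (n : ℕ) (hn : n ≠ 0) :
    Odd n.divisors.card ↔ IsSquare n := by
  classical
  have hsplit1 := Finset.filter_card_add_filter_neg_card_eq_card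
    (s := n.divisors) (p := fun d => d * d < n)
  have hsplit2 := Finset.filter_card_add_filter_neg_card_eq_card
    (s := n.divisors.filter (fun d => ¬ d * d < n)) (p := fun d => d * d = n)
  have hbigeq : ((n.divisors.filter (fun d => ¬ d * d < n)).filter
      (fun d => ¬ d * d = n)) = n.divisors.filter (fun d => n < d * d) := by
    rw [Finset.filter_filter]
    exact Finset.filter_congr (fun d _ => by constructor <;> intro h <;> omega)
  have hmideq : ((n.divisors.filter (fun d => ¬ d * d < n)).filter
      (fun d => d * d = n)) = n.divisors.filter (fun d => d * d = n) := by
    rw [Finset.filter_filter]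
    exact Finset.filter_congr (fun d _ => by constructor <;> intro h <;> omega)
  rw [hbigeq, hmideq] at hsplit2
  have hbij := card_small_eq_card_big n hn
  have hmid : (n.divisors.filter (fun d => d * d = n)).card = if IsSquare n then 1 else 0 := by
    split_ifs with hsq
    · obtain ⟨r, hr⟩ := hsq
      have hr' : r * r = n := hr.symm
      have hset : n.divisors.filter (fun d => d * d = n) = {r} := by
        ext d
        simp only [Finset.mem_filter, Nat.mem_divisors, Finset.mem_singleton]
        constructor
        · rintro ⟨-, hdd⟩
          exact Nat.mul_self_inj.1 (by rw [hdd, hr'])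
        · rintro rfl
          exact ⟨⟨⟨_, hr⟩, hn⟩, hr'⟩
      rw [hset, Finset.card_singleton]
    · rw [Finset.card_eq_zero.2]
      ext d
      simp only [Finset.mem_filter, Finset.notMem_empty, iff_false, not_and]
      intro _ hdd
      exact hsq ⟨d, hdd.symm⟩
  constructor
  · intro hodd
    by_contra hsq
    rw [if_neg hsq] at hmid
    rw [Nat.odd_iff] at hodd
    omega
  · intro hsq
    rw [if_pos hsq] at hmid
    rw [Nat.odd_iff]
    omega

-- A's inner loop counts the divisors of i
theorem innerCount_eq (n : ℕ) :
    ((PySem.List.pyRange 1 ((n : Int) + 1) 1).foldl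
        (fun num j => if PySem.Int.mod (n : Int) j == 0 then num + 1 else num) (0 : Int)) =
      ((List.range n).countP (fun k => decide ((1 + k) ∣ n)) : Int) := by
  rw [foldl_count]
  rw [PySem.List.pyRange_one]
  rw [List.countP_map]
  have hlen : (((n : Int) + 1) - 1).toNat = n := by omega
  rw [hlen, zero_add]
  congr 1
  apply List.countP_congr
  intro k hk
  simp only [Function.comp]
  have hcast : (1 : Int) + (k : Int) = ((1 + k : ℕ) : Int) := by push_cast; ring
  rw [hcast, PySem.Int.mod_natCast]
  rw [Bool.eq_iff_iff]
  simp [Nat.dvd_iff_mod_eq_zero]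
  rw [hcast, Int.natCast_dvd_natCast]
  exact Nat.dvd_iff_mod_eq_zero

-- the per-element bodies agree
theorem body_eq (answer i : Int) :
    (let num := (PySem.List.pyRange 1 (i + 1) 1).foldl
        (fun num j => if PySem.Int.mod i j == 0 then num + 1 else num) (0 : Int)
     if PySem.Int.mod num 2 == 0 then answer + i else answer - i) =
      (if isSquareB i then answer - i else answer + i) := by
  by_cases hpos : 1 ≤ i
  · obtain ⟨n, rfl⟩ : ∃ n : ℕ, i = (n : Int) := ⟨i.toNat, (Int.toNat_of_nonneg (by omega)).symm⟩
    have hn1 : 1 ≤ n := by exact_mod_cast hpos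
    have hne : n ≠ 0 := by omega
    have hmod : PySem.Int.mod ((n.divisors.card : ℕ) : Int) 2 =
        ((n.divisors.card % 2 : ℕ) : Int) := by
      rw [PySem.Int.mod_eq_emod_of_pos (by omega)]
      omega
    simp only [innerCount_eq n, countP_divisors n hne, hmod]
    by_cases hsq : IsSquare n
    · have hodd : Odd n.divisors.card := (odd_card_divisors_iff n hne).2 hsq
      have hm : n.divisors.card % 2 = 1 := Nat.odd_iff.1 hodd
      have hB : isSquareB (n : Int) = true := (isSquareB_iff n hn1).2 hsq
      simp [hm, hB]
    · have hnodd : ¬ Odd n.divisors.card := fun h => hsq ((odd_card_divisors_iff n hne).1 h)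
      have hm : n.divisors.card % 2 = 0 := Nat.even_iff.1 (Nat.not_odd_iff_even.1 hnodd)
      have hB : isSquareB (n : Int) = false := by
        rw [← Bool.not_eq_true]; intro h; exact hsq ((isSquareB_iff n hn1).1 h)
      simp [hm, hB]
  · have hempty : PySem.List.pyRange 1 (i + 1) 1 = [] :=
      PySem.List.pyRange_one_eq_nil (by omega)
    have hB : isSquareB i = false := by simp [isSquareB, show i < 1 by omega]
    simp [hempty, hB, PySem.Int.mod]

-- ===== VERDICT (by name: the statement is the Claim_ definition above) =====
theorem solution_spec : Claim_equal_solution := by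
  intro left right _
  unfold Spec_solution solution solution_alt
  congr 1
  funext answer i
  exact body_eq answer i
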